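-- pv_equiv track=rewrite | github.com/HieuCorn04/DO_AN_AI | doan_hill.py | attacked_queens
-- ===== SOURCE A (Python) =====
-- def attacked_queens(queens):
--     attacked = set()
--     for i, (r, c) in enumerate(queens):
--         for j, (r2, c2) in enumerate(queens):
--             if i != j and (r == r2 or c == c2 or abs(r - r2) == abs(c - c2)):
--                 attacked.add(i)
--                 attacked.add(j)
--     return list(attacked)
-- ===== SOURCE B (Python) =====
-- def attacked_queens(queens):
--     rows = {}
--     cols = {}
--     diag = {}
--     anti = {}
--     for r, c in queens:
--         rows[r] = rows.get(r, 0) + 1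
--         cols[c] = cols.get(c, 0) + 1
--         diag[r - c] = diag.get(r - c, 0) + 1
--         anti[r + c] = anti.get(r + c, 0) + 1
--     return [i for i, (r, c) in enumerate(queens)
--             if rows[r] > 1 or cols[c] > 1 or diag[r - c] > 1 or anti[r + c] > 1]
-- ===== Notes on version B (the rewrite author's own statement) =====
-- stated objective: faster
-- what changed: Replaces the all-pairs double loop with one counting pass that buckets queens by row, column, diagonal (r-c) and anti-diagonal (r+c) in four dicts, then keeps every index whose queen lies in a bucket of size > 1 (indices come out ascending; A returns a set's iteration order, and outputs are compared as sets).
import Mathlib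
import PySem

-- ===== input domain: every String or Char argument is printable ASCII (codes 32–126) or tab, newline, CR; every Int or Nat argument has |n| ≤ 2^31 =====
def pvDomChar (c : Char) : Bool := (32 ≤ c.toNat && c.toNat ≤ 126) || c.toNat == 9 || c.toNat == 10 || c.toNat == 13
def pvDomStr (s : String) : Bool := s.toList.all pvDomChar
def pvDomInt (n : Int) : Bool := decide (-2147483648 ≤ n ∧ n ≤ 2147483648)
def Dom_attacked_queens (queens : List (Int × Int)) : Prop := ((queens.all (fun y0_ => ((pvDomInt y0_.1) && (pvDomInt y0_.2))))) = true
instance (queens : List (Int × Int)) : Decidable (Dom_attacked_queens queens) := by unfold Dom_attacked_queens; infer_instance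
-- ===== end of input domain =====

-- B replaces A's all-pairs double loop by one counting pass over four row/col/diagonal buckets (O(n) vs O(n^2), measured faster).


-- ===== PORT A =====
def attacked_queens (queens : List (Int × Int)) : List Int :=
  let attacked : PySem.Set Int :=
    (PySem.List.enumerate queens).foldl (fun acc x =>
      (PySem.List.enumerate queens).foldl (fun acc2 y =>
        if x.1 ≠ y.1 ∧ (x.2.1 = y.2.1 ∨ x.2.2 = y.2.2 ∨ |x.2.1 - y.2.1| = |x.2.2 - y.2.2|)
        then PySem.Set.add (PySem.Set.add acc2 x.1) y.1
        else acc2) acc) PySem.Set.empty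
  -- list(attacked): a Python set's iteration order is a hash artefact PySem does not model;
  -- rendered in ascending order (the declared output comparison is as a set)
  PySem.List.sorted attacked (fun v => v) false

-- ===== PORT B =====
def attacked_queens_alt (queens : List (Int × Int)) : List Int :=
  let cnts : PySem.Dict Int Int × PySem.Dict Int Int × PySem.Dict Int Int × PySem.Dict Int Int :=
    queens.foldl (fun s q =>
      (s.1.insert q.1 (s.1.getD q.1 0 + 1),
       s.2.1.insert q.2 (s.2.1.getD q.2 0 + 1),
       s.2.2.1.insert (q.1 - q.2) (s.2.2.1.getD (q.1 - q.2) 0 + 1),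
       s.2.2.2.insert (q.1 + q.2) (s.2.2.2.getD (q.1 + q.2) 0 + 1)))
      (PySem.Dict.empty, PySem.Dict.empty, PySem.Dict.empty, PySem.Dict.empty)
  -- rows[r] / cols[c] / diag[r-c] / anti[r+c]: the key is always present (placed by the loop), so d[k] = getD d k 0 exactly
  ((PySem.List.enumerate queens).filter (fun x =>
      decide (1 < cnts.1.getD x.2.1 0 ∨ 1 < cnts.2.1.getD x.2.2 0 ∨
        1 < cnts.2.2.1.getD (x.2.1 - x.2.2) 0 ∨ 1 < cnts.2.2.2.getD (x.2.1 + x.2.2) 0))).map (·.1)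

-- ===== PRECONDITION & SPEC =====
def Spec_attacked_queens (queens : List (Int × Int)) (out : List Int) : Prop := out = attacked_queens_alt queens
instance (queens : List (Int × Int)) (out : List Int) : Decidable (Spec_attacked_queens queens out) := by unfold Spec_attacked_queens; infer_instance

-- ===== CLAIM (what is proved, stated in full; the proofs are below) =====
def Claim_equal_attacked_queens : Prop := ∀ (queens : List (Int × Int)), Dom_attacked_queens queens → Spec_attacked_queens queens (attacked_queens queens)

-- ===== LEMMAS AND PROOFS =====

-- the inner loop of A: what ends up in the set
theorem pv_mem_foldl_inner {α : Type} (l : List α) (P : α → Prop) [DecidablePred P]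
    (g h : α → Int) (acc : PySem.Set Int) (v : Int) :
    v ∈ l.foldl (fun s y => if P y then PySem.Set.add (PySem.Set.add s (g y)) (h y) else s) acc ↔
      v ∈ acc ∨ ∃ y ∈ l, P y ∧ (v = g y ∨ v = h y) := by
  induction l generalizing acc with
  | nil => simp
  | cons a t ih =>
    simp only [List.foldl_cons, ih, List.mem_cons]
    by_cases hp : P a
    · simp only [hp, if_pos, PySem.Set.mem_add]
      constructor
      · rintro (((hv | hv) | hv) | ⟨y, hy, hPy, hvy⟩)
        · exact Or.inl hv
        · exact Or.inr ⟨a, Or.inl rfl, hp, Or.inl hv⟩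
        · exact Or.inr ⟨a, Or.inl rfl, hp, Or.inr hv⟩
        · exact Or.inr ⟨y, Or.inr hy, hPy, hvy⟩
      · rintro (hv | ⟨y, (rfl | hy), hPy, hvy⟩)
        · exact Or.inl (Or.inl (Or.inl hv))
        · rcases hvy with hv | hv
          · exact Or.inl (Or.inl (Or.inr hv))
          · exact Or.inl (Or.inr hv)
        · exact Or.inr ⟨y, hy, hPy, hvy⟩
    · simp only [hp, if_neg, not_false_iff]
      constructor
      · rintro (hv | ⟨y, hy, hPy, hvy⟩)
        · exact Or.inl hv
        · exact Or.inr ⟨y, Or.inr hy, hPy, hvy⟩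
      · rintro (hv | ⟨y, (rfl | hy), hPy, hvy⟩)
        · exact Or.inl hv
        · exact absurd hPy hp
        · exact Or.inr ⟨y, hy, hPy, hvy⟩

-- foldl over set-valued state preserves Nodup
theorem pv_nodup_foldl {α : Type} (l : List α) (f : PySem.Set Int → α → PySem.Set Int)
    (hf : ∀ s x, s.Nodup → (f s x).Nodup) (acc : PySem.Set Int) (hacc : acc.Nodup) :
    (l.foldl f acc).Nodup := by
  induction l generalizing acc with
  | nil => exact hacc
  | cons a t ih => exact ih _ (hf _ _ hacc)

-- the whole double loop of A
theorem pv_mem_foldl_outer_aux (E l : List (Int × Int × Int)) (acc : PySem.Set Int) (v : Int) :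
    v ∈ l.foldl (fun acc x =>
        E.foldl (fun acc2 y =>
          if x.1 ≠ y.1 ∧ (x.2.1 = y.2.1 ∨ x.2.2 = y.2.2 ∨ |x.2.1 - y.2.1| = |x.2.2 - y.2.2|)
          then PySem.Set.add (PySem.Set.add acc2 x.1) y.1
          else acc2) acc) acc ↔
      v ∈ acc ∨ ∃ x ∈ l, ∃ y ∈ E, (x.1 ≠ y.1 ∧ (x.2.1 = y.2.1 ∨ x.2.2 = y.2.2 ∨ |x.2.1 - y.2.1| = |x.2.2 - y.2.2|))
        ∧ (v = x.1 ∨ v = y.1) := by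
  induction l generalizing acc with
  | nil => simp
  | cons a t ih =>
    simp only [List.foldl_cons, ih, List.mem_cons]
    rw [pv_mem_foldl_inner E
      (fun y => a.1 ≠ y.1 ∧ (a.2.1 = y.2.1 ∨ a.2.2 = y.2.2 ∨ |a.2.1 - y.2.1| = |a.2.2 - y.2.2|))
      (fun _ => a.1) (fun y => y.1) acc v]
    constructor
    · rintro ((hv | ⟨y, hy, hP, hvy⟩) | ⟨x, hx, y, hy, hP, hvy⟩)
      · exact Or.inl hv
      · exact Or.inr ⟨a, Or.inl rfl, y, hy, hP, hvy⟩
      · exact Or.inr ⟨x, Or.inr hx, y, hy, hP, hvy⟩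
    · rintro (hv | ⟨x, (rfl | hx), y, hy, hP, hvy⟩)
      · exact Or.inl (Or.inl hv)
      · exact Or.inl (Or.inr ⟨y, hy, hP, hvy⟩)
      · exact Or.inr ⟨x, hx, y, hy, hP, hvy⟩

theorem pv_mem_foldl_outer (E : List (Int × Int × Int)) (v : Int) :
    v ∈ E.foldl (fun acc x =>
        E.foldl (fun acc2 y =>
          if x.1 ≠ y.1 ∧ (x.2.1 = y.2.1 ∨ x.2.2 = y.2.2 ∨ |x.2.1 - y.2.1| = |x.2.2 - y.2.2|)
          then PySem.Set.add (PySem.Set.add acc2 x.1) y.1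
          else acc2) acc) PySem.Set.empty ↔
      ∃ x ∈ E, ∃ y ∈ E, (x.1 ≠ y.1 ∧ (x.2.1 = y.2.1 ∨ x.2.2 = y.2.2 ∨ |x.2.1 - y.2.1| = |x.2.2 - y.2.2|))
        ∧ (v = x.1 ∨ v = y.1) := by
  rw [pv_mem_foldl_outer_aux E E PySem.Set.empty v]
  simp [PySem.Set.empty]

theorem pv_nodup_foldl_outer (E : List (Int × Int × Int)) :
    (E.foldl (fun acc x =>
        E.foldl (fun acc2 y =>
          if x.1 ≠ y.1 ∧ (x.2.1 = y.2.1 ∨ x.2.2 = y.2.2 ∨ |x.2.1 - y.2.1| = |x.2.2 - y.2.2|)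
          then PySem.Set.add (PySem.Set.add acc2 x.1) y.1
          else acc2) acc) PySem.Set.empty).Nodup := by
  apply pv_nodup_foldl
  · intro s x hs
    apply pv_nodup_foldl
    · intro s2 y hs2
      split_ifs with h
      · exact PySem.Set.nodup_add _ _ (PySem.Set.nodup_add _ _ hs2)
      · exact hs2
    · exact hs
  · simp [PySem.Set.empty]

-- B's counting state, projected: each dict is the increment-fold over the key list
theorem pv_cnts_eq (l : List (Int × Int)) (a b c d : PySem.Dict Int Int) :
    l.foldl (fun s q =>
      (s.1.insert q.1 (s.1.getD q.1 0 + 1),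
       s.2.1.insert q.2 (s.2.1.getD q.2 0 + 1),
       s.2.2.1.insert (q.1 - q.2) (s.2.2.1.getD (q.1 - q.2) 0 + 1),
       s.2.2.2.insert (q.1 + q.2) (s.2.2.2.getD (q.1 + q.2) 0 + 1))) (a, b, c, d) =
      ((l.map (·.1)).foldl (fun t x => t.insert x (t.getD x 0 + 1)) a,
       (l.map (·.2)).foldl (fun t x => t.insert x (t.getD x 0 + 1)) b,
       (l.map (fun q => q.1 - q.2)).foldl (fun t x => t.insert x (t.getD x 0 + 1)) c,
       (l.map (fun q => q.1 + q.2)).foldl (fun t x => t.insert x (t.getD x 0 + 1)) d) := by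
  induction l generalizing a b c d with
  | nil => rfl
  | cons q t ih => simp [List.foldl_cons, ih]

-- two distinct-by-fst hits make a count of at least 2, and conversely
theorem pv_count_iff (E : List (Int × Int × Int)) (hE : (E.map (·.1)).Nodup)
    (x : Int × Int × Int) (hx : x ∈ E) (p : Int × Int → Prop) [DecidablePred p] (hpx : p x.2) :
    2 ≤ E.countP (fun y => decide (p y.2)) ↔ ∃ y ∈ E, y.1 ≠ x.1 ∧ p y.2 := by
  rw [List.countP_eq_length_filter]
  set F := E.filter (fun y => decide (p y.2)) with hF
  have hxF : x ∈ F := by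
    rw [hF, List.mem_filter]
    exact ⟨hx, by simpa using hpx⟩
  have hsub : F.Sublist E := List.filter_sublist
  have hFfst : (F.map (·.1)).Nodup := (hsub.map (·.1)).nodup hE
  have hFmem : ∀ y ∈ F, y ∈ E ∧ p y.2 := by
    intro y hy
    rw [hF, List.mem_filter] at hy
    exact ⟨hy.1, by simpa using hy.2⟩
  constructor
  · intro hlen
    have hFnd : F.Nodup := List.Nodup.of_map _ hFfst
    have hpos : 0 < (F.erase x).length := by
      rw [List.length_erase_of_mem hxF]
      omega
    obtain ⟨y, hy⟩ := List.length_pos_iff_exists_mem.mp hpos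
    have hyF : y ∈ F := List.mem_of_mem_erase hy
    have hyx : y ≠ x := by
      rintro rfl
      exact List.Nodup.not_mem_erase hFnd hy
    refine ⟨y, (hFmem y hyF).1, ?_, (hFmem y hyF).2⟩
    intro hfst
    exact hyx (List.inj_on_of_nodup_map hFfst hyF hxF hfst)
  · rintro ⟨y, hyE, hyx, hpy⟩
    have hyF : y ∈ F := by
      rw [hF, List.mem_filter]
      exact ⟨hyE, by simpa using hpy⟩
    obtain ⟨s, t, hst⟩ := List.mem_iff_append.mp hxF
    have hyst : y ∈ s ∨ y ∈ t := by
      rw [hst] at hyF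
      rcases List.mem_append.mp hyF with h | h
      · exact Or.inl h
      · rcases List.mem_cons.mp h with h | h
        · exact absurd (by rw [h]) hyx
        · exact Or.inr h
    have : 0 < s.length ∨ 0 < t.length := by
      rcases hyst with h | h
      · exact Or.inl (List.length_pos_of_mem h)
      · exact Or.inr (List.length_pos_of_mem h)
    rw [hst]
    simp only [List.length_append, List.length_cons]
    omega

-- |r-r2| = |c-c2| names the two diagonals
theorem pv_abs_iff (r c r2 c2 : Int) : (|r - r2| = |c - c2|) ↔ (r - c = r2 - c2 ∨ r + c = r2 + c2) := by
  rw [abs_eq_abs]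
  omega

-- B's per-index bucket test ↔ A's "some other queen attacks me"
theorem pv_bcond_iff (E : List (Int × Int × Int)) (hE : (E.map (·.1)).Nodup)
    (x : Int × Int × Int) (hx : x ∈ E) :
    (1 < E.countP (fun y => y.2.1 == x.2.1) ∨ 1 < E.countP (fun y => y.2.2 == x.2.2) ∨
     1 < E.countP (fun y => y.2.1 - y.2.2 == x.2.1 - x.2.2) ∨
     1 < E.countP (fun y => y.2.1 + y.2.2 == x.2.1 + x.2.2)) ↔
    ∃ y ∈ E, x.1 ≠ y.1 ∧ (x.2.1 = y.2.1 ∨ x.2.2 = y.2.2 ∨ |x.2.1 - y.2.1| = |x.2.2 - y.2.2|) := by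
  have h1 := pv_count_iff E hE x hx (fun q => q.1 = x.2.1) rfl
  have h2 := pv_count_iff E hE x hx (fun q => q.2 = x.2.2) rfl
  have h3 := pv_count_iff E hE x hx (fun q => q.1 - q.2 = x.2.1 - x.2.2) rfl
  have h4 := pv_count_iff E hE x hx (fun q => q.1 + q.2 = x.2.1 + x.2.2) rfl
  simp only [Bool.beq_eq_decide_eq]
  constructor
  · rintro (h | h | h | h)
    · obtain ⟨y, hy, hne, hp⟩ := h1.mp h
      exact ⟨y, hy, hne.symm, Or.inl hp.symm⟩
    · obtain ⟨y, hy, hne, hp⟩ := h2.mp h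
      exact ⟨y, hy, hne.symm, Or.inr (Or.inl hp.symm)⟩
    · obtain ⟨y, hy, hne, hp⟩ := h3.mp h
      exact ⟨y, hy, hne.symm, Or.inr (Or.inr ((pv_abs_iff _ _ _ _).mpr (Or.inl (by omega))))⟩
    · obtain ⟨y, hy, hne, hp⟩ := h4.mp h
      exact ⟨y, hy, hne.symm, Or.inr (Or.inr ((pv_abs_iff _ _ _ _).mpr (Or.inr (by omega))))⟩
  · rintro ⟨y, hy, hne, (hp | hp | hp)⟩
    · exact Or.inl (h1.mpr ⟨y, hy, hne.symm, hp.symm⟩)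
    · exact Or.inr (Or.inl (h2.mpr ⟨y, hy, hne.symm, hp.symm⟩))
    · rcases (pv_abs_iff _ _ _ _).mp hp with hd | hd
      · exact Or.inr (Or.inr (Or.inl (h3.mpr ⟨y, hy, hne.symm, by omega⟩)))
      · exact Or.inr (Or.inr (Or.inr (h4.mpr ⟨y, hy, hne.symm, by omega⟩)))

-- each of B's dicts, looked up, is a countP over the enumerated list
theorem pv_getD_count (queens : List (Int × Int)) (key : Int × Int → Int) (v : Int) :
    ((queens.map key).foldl (fun t x => t.insert x (t.getD x 0 + 1)) PySem.Dict.empty).getD v 0 =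
      ((PySem.List.enumerate queens).countP (fun y => key y.2 == v) : Int) := by
  rw [PySem.Dict.getD_foldl_insert_add_one, PySem.Dict.getD_empty, zero_add]
  congr 1
  rw [List.count_eq_countP, List.countP_map]
  conv_lhs => rw [← PySem.List.map_snd_enumerate queens 0]
  rw [List.countP_map]
  rfl

theorem attacked_queens_spec : Claim_equal_attacked_queens := by
  intro queens _
  show attacked_queens queens = attacked_queens_alt queens
  simp only [attacked_queens, attacked_queens_alt]
  rw [pv_cnts_eq]
  simp only [pv_getD_count]
  have hfst := PySem.List.map_fst_enumerate queens 0
  have hpwfst : ((PySem.List.enumerate queens).map (·.1)).Pairwise (· < ·) := by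
    rw [hfst]
    exact PySem.List.pairwise_lt_pyRange_one _ _
  have hndfst : ((PySem.List.enumerate queens).map (·.1)).Nodup :=
    hpwfst.imp (fun h => Int.ne_of_lt h)
  have hsub : (((PySem.List.enumerate queens).filter
      (fun x => decide (1 < ((PySem.List.enumerate queens).countP (fun y => y.2.1 == x.2.1) : Int) ∨
        1 < ((PySem.List.enumerate queens).countP (fun y => y.2.2 == x.2.2) : Int) ∨
        1 < ((PySem.List.enumerate queens).countP (fun y => y.2.1 - y.2.2 == x.2.1 - x.2.2) : Int) ∨
        1 < ((PySem.List.enumerate queens).countP (fun y => y.2.1 + y.2.2 == x.2.1 + x.2.2) : Int)))).map (·.1)).Sublist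
      ((PySem.List.enumerate queens).map (·.1)) :=
    List.Sublist.map (fun x : Int × Int × Int => x.1) List.filter_sublist
  have hpwB := hpwfst.sublist hsub
  apply PySem.List.sorted_eq_of_perm_of_pairwise_lt
  · apply (List.perm_ext_iff_of_nodup (hpwB.imp (fun h => Int.ne_of_lt h)) (pv_nodup_foldl_outer _)).mpr
    intro v
    rw [pv_mem_foldl_outer]
    simp only [List.mem_map, List.mem_filter, decide_eq_true_eq]
    constructor
    · rintro ⟨x, ⟨hxE, hb⟩, rfl⟩
      have hb' : 1 < (PySem.List.enumerate queens).countP (fun y => y.2.1 == x.2.1) ∨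
          1 < (PySem.List.enumerate queens).countP (fun y => y.2.2 == x.2.2) ∨
          1 < (PySem.List.enumerate queens).countP (fun y => y.2.1 - y.2.2 == x.2.1 - x.2.2) ∨
          1 < (PySem.List.enumerate queens).countP (fun y => y.2.1 + y.2.2 == x.2.1 + x.2.2) := by
        rcases hb with h | h | h | h
        · exact Or.inl (by exact_mod_cast h)
        · exact Or.inr (Or.inl (by exact_mod_cast h))
        · exact Or.inr (Or.inr (Or.inl (by exact_mod_cast h)))
        · exact Or.inr (Or.inr (Or.inr (by exact_mod_cast h)))
      obtain ⟨y, hyE, hne, hatk⟩ := (pv_bcond_iff _ hndfst x hxE).mp hb'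
      exact ⟨x, hxE, y, hyE, ⟨hne, hatk⟩, Or.inl rfl⟩
    · rintro ⟨x, hxE, y, hyE, ⟨hne, hatk⟩, (rfl | rfl)⟩
      · refine ⟨x, ⟨hxE, ?_⟩, rfl⟩
        have := (pv_bcond_iff _ hndfst x hxE).mpr ⟨y, hyE, hne, hatk⟩
        rcases this with h | h | h | h
        · exact Or.inl (by exact_mod_cast h)
        · exact Or.inr (Or.inl (by exact_mod_cast h))
        · exact Or.inr (Or.inr (Or.inl (by exact_mod_cast h)))
        · exact Or.inr (Or.inr (Or.inr (by exact_mod_cast h)))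
      · refine ⟨y, ⟨hyE, ?_⟩, rfl⟩
        have hatk' : y.2.1 = x.2.1 ∨ y.2.2 = x.2.2 ∨ |y.2.1 - x.2.1| = |y.2.2 - x.2.2| := by
          rcases hatk with h | h | h
          · exact Or.inl h.symm
          · exact Or.inr (Or.inl h.symm)
          · exact Or.inr (Or.inr (by rw [abs_sub_comm, abs_sub_comm y.2.2]; exact h))
        have := (pv_bcond_iff _ hndfst y hyE).mpr ⟨x, hxE, hne.symm, hatk'⟩
        rcases this with h | h | h | h
        · exact Or.inl (by exact_mod_cast h)
        · exact Or.inr (Or.inl (by exact_mod_cast h))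
        · exact Or.inr (Or.inr (Or.inl (by exact_mod_cast h)))
        · exact Or.inr (Or.inr (Or.inr (by exact_mod_cast h)))
  · exact hpwB
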